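-- pv_equiv track=rewrite | github.com/eric15342335/misc | ungrouped/1117/seq.py | f
-- ===== SOURCE A (Python) =====
-- def f(a:int)->int:
--     if a == 0:
--         return 2
--     if a == 1:
--         return 1
--     if a == 2:
--         return 3
--     return f(a-2)*f(a-3)
-- ===== SOURCE B (Python) =====
-- def f(a: int) -> int:
--     if a == 0:
--         return 2
--     if a == 1:
--         return 1
--     if a == 2:
--         return 3
--     x, y, z = 2, 1, 3  # the three most recent sequence values
--     for _ in range(3, a + 1):
--         x, y, z = y, z, y * x
--     return z
-- ===== Notes on version B (the rewrite author's own statement) =====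
-- stated objective: alternative
-- what changed: Replaced the exponential double recursion by a bottom-up loop keeping the last three sequence values, doing one multiplication per step.
import Mathlib
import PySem

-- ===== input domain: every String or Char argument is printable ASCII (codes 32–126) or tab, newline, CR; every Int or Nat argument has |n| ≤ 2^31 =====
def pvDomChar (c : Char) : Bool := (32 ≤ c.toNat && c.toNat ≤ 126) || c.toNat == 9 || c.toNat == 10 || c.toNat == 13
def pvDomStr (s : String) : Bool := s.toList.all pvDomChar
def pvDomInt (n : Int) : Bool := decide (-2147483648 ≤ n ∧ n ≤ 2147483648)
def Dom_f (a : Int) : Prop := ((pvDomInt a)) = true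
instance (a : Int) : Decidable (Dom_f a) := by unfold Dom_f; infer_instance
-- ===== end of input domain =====

-- B replaces A's double recursion by a bottom-up loop over the last three values (objective: alternative).

-- ===== PORT A =====
-- A's recursion f(a-2)*f(a-3) only terminates for a ≥ 0; the Nat-indexed helper is the
-- same recursion, the 'a < 0' guard only makes the Lean function total (Pre_f excludes a < 0).
def fAux : Nat → Int
  | 0 => 2
  | 1 => 1
  | 2 => 3
  | n + 3 => fAux (n + 1) * fAux n

def f (a : Int) : Int :=
  if a < 0 then 0 else fAux a.toNat

-- ===== PORT B =====
def f_alt (a : Int) : Int :=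
  if a = 0 then 2
  else if a = 1 then 1
  else if a = 2 then 3
  else
    let s := (PySem.List.pyRange 3 (a + 1) 1).foldl
      (fun (s : Int × Int × Int) _ => (s.2.1, s.2.2, s.2.1 * s.1)) (2, 1, 3)
    s.2.2

-- ===== PRECONDITION & SPEC =====
-- Pre_f excludes a < 0, where A's recursion never reaches a base case (Python RecursionError).
def Pre_f (a : Int) : Prop := 0 ≤ a
instance (a : Int) : Decidable (Pre_f a) := by unfold Pre_f; infer_instance
def pvWitness_f : Int := 5
def Spec_f (a : Int) (out : Int) : Prop := out = f_alt a
instance (a : Int) (out : Int) : Decidable (Spec_f a out) := by unfold Spec_f; infer_instance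

-- ===== CLAIM =====
def Claim_equal_f : Prop := ∀ (a : Int), Dom_f a → Pre_f a → Spec_f a (f a)

-- ===== LEMMAS AND PROOFS =====
theorem foldl_fAux (n : Nat) :
    (PySem.List.pyRange 3 ((n : Int) + 4) 1).foldl
      (fun (s : Int × Int × Int) _ => (s.2.1, s.2.2, s.2.1 * s.1)) (2, 1, 3)
    = (fAux (n + 1), fAux (n + 2), fAux (n + 3)) := by
  induction n with
  | zero =>
    simp only [Nat.cast_zero, zero_add]
    rw [show (4 : Int) = 3 + 1 by norm_num, PySem.List.pyRange_one_singleton]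
    simp [fAux]
  | succ k ih =>
    have h : ((k : Int) + 1) + 4 = ((k : Int) + 4) + 1 := by ring
    rw [Nat.cast_add, Nat.cast_one, h,
      PySem.List.pyRange_one_succ_right (by omega), List.foldl_append, ih]
    simp only [List.foldl_cons, List.foldl_nil]
    have : fAux (k + 4) = fAux (k + 2) * fAux (k + 1) := rfl
    simp [this]

-- ===== VERDICT =====
theorem f_spec : Claim_equal_f := by
  intro a _ hpre
  unfold Pre_f at hpre
  unfold Spec_f f f_alt
  rw [if_neg (by omega)]
  by_cases h0 : a = 0
  · subst h0; simp [fAux]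
  by_cases h1 : a = 1
  · subst h1; simp [fAux]
  by_cases h2 : a = 2
  · subst h2; simp [fAux]
  · rw [if_neg h0, if_neg h1, if_neg h2]
    have h3 : 3 ≤ a := by omega
    obtain ⟨n, hn⟩ : ∃ n : Nat, a = (n : Int) + 3 :=
      ⟨(a - 3).toNat, by omega⟩
    subst hn
    have ha : ((n : Int) + 3 + 1) = (n : Int) + 4 := by ring
    rw [ha, foldl_fAux n]
    have : ((n : Int) + 3).toNat = n + 3 := by omega
    simp [this]
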